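-- pv_equiv track=rewrite | github.com/buguja/Progra-IO | Transporte/Transp.py | getSolucionesAux
-- ===== SOURCE A (Python) =====
-- def getSolucionesAux(items,solucionTotal,solucionParcial):
--     if (items==[]):
--         return [solucionParcial]
--     for i,posiciones in enumerate(items[0]):
--             if posiciones in solucionParcial:
--                 continue
--             else:
--                 solucionTotal.extend(getSolucionesAux(items[1:],[],solucionParcial+[posiciones]))
--     return solucionTotal
-- ===== SOURCE B (Python) =====
-- def getSolucionesAux(items, solucionTotal, solucionParcial):
--     if not items:
--         return [solucionParcial]
--     stack = [(items, solucionParcial)]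
--     while stack:
--         remaining, partial = stack.pop()
--         if not remaining:
--             solucionTotal.append(partial)
--         else:
--             for pos in reversed(remaining[0]):
--                 if pos not in partial:
--                     stack.append((remaining[1:], partial + [pos]))
--     return solucionTotal
-- ===== Notes on version B (the rewrite author's own statement) =====
-- stated objective: alternative
-- what changed: Replaced the recursive backtracking (recursion + for-loop with extend) by an explicit LIFO stack/worklist of (remaining-items, partial-choice) states, pushing children in reverse so the DFS output order is preserved; same in-place mutation of solucionTotal.
import Mathlib
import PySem

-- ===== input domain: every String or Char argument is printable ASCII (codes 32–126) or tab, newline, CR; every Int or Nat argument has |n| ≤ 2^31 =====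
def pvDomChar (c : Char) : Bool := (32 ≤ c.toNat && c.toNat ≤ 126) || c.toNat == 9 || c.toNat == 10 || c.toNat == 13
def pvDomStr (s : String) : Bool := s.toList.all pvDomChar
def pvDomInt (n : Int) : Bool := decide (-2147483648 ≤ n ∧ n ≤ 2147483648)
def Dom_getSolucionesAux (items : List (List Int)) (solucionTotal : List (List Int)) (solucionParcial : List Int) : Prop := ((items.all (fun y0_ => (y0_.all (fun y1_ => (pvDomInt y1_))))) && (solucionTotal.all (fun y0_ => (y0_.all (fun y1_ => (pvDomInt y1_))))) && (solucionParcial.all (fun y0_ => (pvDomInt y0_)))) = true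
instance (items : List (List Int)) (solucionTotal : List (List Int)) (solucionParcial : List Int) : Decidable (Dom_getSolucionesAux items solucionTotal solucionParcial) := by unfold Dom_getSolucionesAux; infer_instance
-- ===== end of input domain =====

-- B replaces A's recursive backtracking with an explicit LIFO stack/worklist (same DFS output order;
-- like A, B mutates solucionTotal in place in Python — the equivalence proved here is about the return value,
-- which for both equals the mutated list).


-- ===== PORT A =====
-- A: if items==[] return [solucionParcial]; else for each position of items[0] not already in
-- solucionParcial, extend solucionTotal with the recursive result on items[1:] with a fresh [] accumulator.
-- goForA is A's for-loop over the positions of items[0], with solucionTotal as the accumulator.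
mutual
  def getSolucionesAux (items : List (List Int)) (solucionTotal : List (List Int)) (solucionParcial : List Int) : List (List Int) :=
    match items with
    | [] => [solucionParcial]
    | x :: rest => goForA x rest solucionTotal solucionParcial
  termination_by (items.length, 1, 0)

  def goForA (poss : List Int) (rest : List (List Int)) (tot : List (List Int)) (parcial : List Int) : List (List Int) :=
    match poss with
    | [] => tot
    | pos :: ps =>
      if pos ∈ parcial then goForA ps rest tot parcial
      else goForA ps rest (tot ++ getSolucionesAux rest [] (parcial ++ [pos])) parcial
  termination_by (rest.length + 1, 0, poss.length)
end

-- ===== PORT B =====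
-- weight of one stack state: bounds how many pushes the state and its descendants can cause.
def altWeight : List (List Int) → Nat
  | [] => 1
  | x :: rs => 1 + x.length * altWeight rs

def altMeasure (st : List (List (List Int) × List Int)) : Nat :=
  (st.map (fun s => altWeight s.1)).sum

-- the inner for-loop of B: push a child for each position of x, iterating in reversed order
def pushChildren (x : List Int) (rs : List (List Int)) (p : List Int)
    (base : List (List (List Int) × List Int)) : List (List (List Int) × List Int) :=
  x.reverse.foldl (fun st pos => if pos ∈ p then st else (rs, p ++ [pos]) :: st) base

theorem altMeasure_foldl_push_le (rs : List (List Int)) (p : List Int) (l : List Int)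
    (base : List (List (List Int) × List Int)) :
    altMeasure (l.foldl (fun st pos => if pos ∈ p then st else (rs, p ++ [pos]) :: st) base)
      ≤ altMeasure base + l.length * altWeight rs := by
  induction l generalizing base with
  | nil => simp
  | cons a l ih =>
    simp only [List.foldl_cons, List.length_cons]
    by_cases h : a ∈ p
    · simp only [h, if_pos]
      have := ih base
      have hpos : 0 < altWeight rs := by cases rs <;> simp [altWeight]
      calc _ ≤ altMeasure base + l.length * altWeight rs := ih base
        _ ≤ _ := by ring_nf; omega
    · simp only [h, if_neg, not_false_iff]
      calc _ ≤ altMeasure ((rs, p ++ [a]) :: base) + l.length * altWeight rs := ih _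
        _ = altMeasure base + altWeight rs + l.length * altWeight rs := by
              simp [altMeasure]; ring
        _ ≤ _ := by ring_nf; omega

theorem altMeasure_pushChildren_lt (x : List Int) (rs : List (List Int)) (p : List Int)
    (rest : List (List (List Int) × List Int)) :
    altMeasure (pushChildren x rs p rest) < altMeasure ((x :: rs, p) :: rest) := by
  have h := altMeasure_foldl_push_le rs p x.reverse rest
  simp only [List.length_reverse] at h
  simp only [pushChildren, altMeasure, altWeight, List.map_cons, List.sum_cons] at *
  omega

-- B's while-loop over the stack; head of the list is the top of the stack.
def altLoop (stack : List (List (List Int) × List Int)) (acc : List (List Int)) : List (List Int) :=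
  match stack with
  | [] => acc
  | (r, p) :: rest =>
    match r with
    | [] => altLoop rest (acc ++ [p])
    | x :: rs => altLoop (pushChildren x rs p rest) acc
termination_by altMeasure stack
decreasing_by
  · simp [altMeasure, altWeight]
  · exact altMeasure_pushChildren_lt x rs p rest

def getSolucionesAux_alt (items : List (List Int)) (solucionTotal : List (List Int)) (solucionParcial : List Int) : List (List Int) :=
  match items with
  | [] => [solucionParcial]
  | _ :: _ => altLoop [(items, solucionParcial)] solucionTotal

-- ===== PRECONDITION & SPEC =====
def Spec_getSolucionesAux (items : List (List Int)) (solucionTotal : List (List Int)) (solucionParcial : List Int) (out : List (List Int)) : Prop := out = getSolucionesAux_alt items solucionTotal solucionParcial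
instance (items : List (List Int)) (solucionTotal : List (List Int)) (solucionParcial : List Int) (out : List (List Int)) : Decidable (Spec_getSolucionesAux items solucionTotal solucionParcial out) := by unfold Spec_getSolucionesAux; infer_instance

-- ===== CLAIM (what is proved, stated in full; the proofs are below) =====
def Claim_equal_getSolucionesAux : Prop := ∀ (items : List (List Int)) (solucionTotal : List (List Int)) (solucionParcial : List Int), Dom_getSolucionesAux items solucionTotal solucionParcial → Spec_getSolucionesAux items solucionTotal solucionParcial (getSolucionesAux items solucionTotal solucionParcial)

-- ===== LEMMAS AND PROOFS =====

-- The mathematical enumeration both programs compute on a nonempty item list.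
def sols : List (List Int) → List Int → List (List Int)
  | [], p => [p]
  | x :: rs, p => x.flatMap (fun pos => if pos ∈ p then [] else sols rs (p ++ [pos]))

theorem goForA_eq (poss : List Int) (rest : List (List Int)) (tot : List (List Int)) (parcial : List Int)
    (ih : ∀ p, getSolucionesAux rest [] p = sols rest p) :
    goForA poss rest tot parcial
      = tot ++ poss.flatMap (fun pos => if pos ∈ parcial then [] else sols rest (parcial ++ [pos])) := by
  induction poss generalizing tot with
  | nil => rw [goForA]; simp
  | cons a ps ihp =>
    rw [goForA]
    by_cases h : a ∈ parcial
    · simp [h, ihp]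
    · simp [h, ihp, ih]

theorem A_eq_sols : ∀ (items : List (List Int)) (p : List Int),
    getSolucionesAux items [] p = sols items p := by
  intro items
  induction items with
  | nil => intro p; rw [getSolucionesAux]; simp [sols]
  | cons x rs ih =>
    intro p
    rw [getSolucionesAux, goForA_eq x rs [] p ih]
    simp [sols]

theorem A_eq_sols' (x : List Int) (rs : List (List Int)) (tot : List (List Int)) (p : List Int) :
    getSolucionesAux (x :: rs) tot p = tot ++ sols (x :: rs) p := by
  rw [getSolucionesAux, goForA_eq x rs tot p (A_eq_sols rs)]
  simp [sols]

theorem foldl_push_eq (rs : List (List Int)) (p : List Int) (l : List Int)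
    (base : List (List (List Int) × List Int)) :
    l.reverse.foldl (fun st pos => if pos ∈ p then st else (rs, p ++ [pos]) :: st) base
      = (l.filterMap (fun pos => if pos ∈ p then none else some (rs, p ++ [pos]))) ++ base := by
  induction l with
  | nil => simp
  | cons a l ih =>
    rw [List.reverse_cons, List.foldl_append, ih]
    by_cases h : a ∈ p <;> simp [h]

theorem flatMap_filterMap_children (rs : List (List Int)) (p : List Int) (l : List Int) :
    ((l.filterMap (fun pos => if pos ∈ p then none else some (rs, p ++ [pos]))).flatMap
        (fun s => sols s.1 s.2))
      = l.flatMap (fun pos => if pos ∈ p then [] else sols rs (p ++ [pos])) := by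
  induction l with
  | nil => simp
  | cons a l ih =>
    by_cases h : a ∈ p <;> simp [h, ih]

theorem altLoop_eq (st : List (List (List Int) × List Int)) (acc : List (List Int)) :
    altLoop st acc = acc ++ st.flatMap (fun s => sols s.1 s.2) := by
  induction st, acc using altLoop.induct with
  | case1 acc => rw [altLoop]; simp
  | case2 acc p rest ih => rw [altLoop]; simp [sols, ih]
  | case3 acc p rest x rs ih =>
    rw [altLoop, ih, pushChildren, foldl_push_eq, List.flatMap_append, flatMap_filterMap_children]
    simp [sols]

-- ===== VERDICT (by name: the statement is the Claim_ definition above) =====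
theorem getSolucionesAux_spec : Claim_equal_getSolucionesAux := by
  intro items tot p _
  unfold Spec_getSolucionesAux getSolucionesAux_alt
  match items with
  | [] => rw [getSolucionesAux]
  | x :: rs => rw [A_eq_sols', altLoop_eq]; simp
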